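-- pv_equiv track=rewrite | github.com/epicfaace/qems2 | qems2/qsub/utils.py | get_formatted_question_html
-- ===== SOURCE A (Python) =====
-- def get_formatted_question_html(line, allowUnderlines, allowParens, allowNewLines):
--     italicsFlag = False
--     parensFlag = False
--     underlineFlag = False
--     output = ""
--     for c in line:
--         if (c == "~"):
--             if (not italicsFlag):
--                 output += "<i>"
--                 italicsFlag = True
--             else:
--                 output += "</i>"
--                 italicsFlag = False
--         elif (c == "(" and allowParens):
--             output += "<strong>("
--             parensFlag = True
--         elif (c == ")" and allowParens):
--             output += ")</strong>"
--             parensFlag = False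
--         else:
--             if (c == "_" and allowUnderlines):
--                 if (not underlineFlag):
--                     output += "<b><u>"
--                     underlineFlag = True
--                 else:
--                     output += "</b></u>"
--                     underlineFlag = False
--             else:
--                 output += c
--
--     if (italicsFlag):
--         output += "</i>"
--
--     if (underlineFlag):
--         output += "</b></u>"
--
--     if (parensFlag):
--         output += "</strong>"
--
--     if (allowNewLines):
--         output = output.replace("&lt;br&gt;", "<br>")
--
--     return output
-- ===== SOURCE B (Python) =====
-- def get_formatted_question_html(line, allowUnderlines, allowParens, allowNewLines):
--     # Pass 1: italics -- split on '~', rejoin interleaving open/close tags;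
--     # close at the end if the last inserted tag was an opening one.
--     parts = line.split("~")
--     out = parts[0]
--     openNext = True
--     for piece in parts[1:]:
--         out += ("<i>" if openNext else "</i>") + piece
--         openNext = not openNext
--     if not openNext:
--         out += "</i>"
--     # Pass 2: underlines -- same split/rejoin scheme on '_'.
--     if allowUnderlines:
--         parts = out.split("_")
--         out = parts[0]
--         openNext = True
--         for piece in parts[1:]:
--             out += ("<b><u>" if openNext else "</b></u>") + piece
--             openNext = not openNext
--         if not openNext:
--             out += "</b></u>"
--     # Pass 3: parens -- context-free substitution; close at the end iff the
--     # last paren character of the input line is an opening one.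
--     if allowParens:
--         out = out.replace("(", "<strong>(").replace(")", ")</strong>")
--         if line.rfind("(") > line.rfind(")"):
--             out += "</strong>"
--     if allowNewLines:
--         out = out.replace("&lt;br&gt;", "<br>")
--     return out
-- ===== Notes on version B (the rewrite author's own statement) =====
-- stated objective: faster
-- what changed: A's single character loop with three interacting tag flags is replaced by one independent pass per marker type: split on '~' and rejoin interleaving <i>/</i> (closing at the end if the count is odd), the same split/rejoin on '_' when underlines are allowed, and a context-free substitution for parens with a final rfind comparison deciding the trailing </strong>.
import Mathlib
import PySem

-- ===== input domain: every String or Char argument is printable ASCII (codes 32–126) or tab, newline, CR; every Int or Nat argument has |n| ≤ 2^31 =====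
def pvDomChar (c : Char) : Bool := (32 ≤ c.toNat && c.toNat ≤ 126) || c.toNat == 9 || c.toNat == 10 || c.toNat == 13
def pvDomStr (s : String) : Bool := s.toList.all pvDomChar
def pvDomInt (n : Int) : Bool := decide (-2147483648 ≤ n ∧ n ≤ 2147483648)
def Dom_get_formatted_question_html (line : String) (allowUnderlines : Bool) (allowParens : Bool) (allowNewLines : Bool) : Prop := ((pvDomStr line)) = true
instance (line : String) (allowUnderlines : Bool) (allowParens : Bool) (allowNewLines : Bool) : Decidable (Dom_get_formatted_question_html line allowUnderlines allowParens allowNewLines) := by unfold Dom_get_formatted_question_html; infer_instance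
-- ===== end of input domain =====

-- B replaces A's single three-flag character loop by one independent pass per marker type
-- (split/rejoin for '~' and '_', context-free substitution plus an rfind test for parens); measured faster by a constant factor (bulk string ops).

-- ===== PORT A =====
-- A-side helper: the body of A's for-loop (state: output, italicsFlag, parensFlag, underlineFlag)
def aStep (allowUnderlines allowParens : Bool) (st : List Char × Bool × Bool × Bool) (c : Char) : List Char × Bool × Bool × Bool :=
  match st with
  | (output, italicsFlag, parensFlag, underlineFlag) =>
    if c = '~' then
      if !italicsFlag then (output ++ "<i>".toList, true, parensFlag, underlineFlag)
      else (output ++ "</i>".toList, false, parensFlag, underlineFlag)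
    else if c = '(' ∧ allowParens then (output ++ "<strong>(".toList, italicsFlag, true, underlineFlag)
    else if c = ')' ∧ allowParens then (output ++ ")</strong>".toList, italicsFlag, false, underlineFlag)
    else if c = '_' ∧ allowUnderlines then
      if !underlineFlag then (output ++ "<b><u>".toList, italicsFlag, parensFlag, true)
      else (output ++ "</b></u>".toList, italicsFlag, parensFlag, false)
    else (output ++ [c], italicsFlag, parensFlag, underlineFlag)

def get_formatted_question_html (line : String) (allowUnderlines : Bool) (allowParens : Bool) (allowNewLines : Bool) : String :=
  let r := line.toList.foldl (aStep allowUnderlines allowParens) ([], false, false, false)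
  let output := r.1
  let output := if r.2.1 then output ++ "</i>".toList else output
  let output := if r.2.2.2 then output ++ "</b></u>".toList else output
  let output := if r.2.2.1 then output ++ "</strong>".toList else output
  let output := if allowNewLines then PySem.Chars.replace output "&lt;br&gt;".toList "<br>".toList else output
  String.mk output

-- ===== PORT B =====
-- B-side helper: the body of B's rejoin loop (state: out, openNext)
def joinStep (ot ct : List Char) (st : List Char × Bool) (piece : List Char) : List Char × Bool :=
  (st.1 ++ (if st.2 then ot else ct) ++ piece, !st.2)

def get_formatted_question_html_alt (line : String) (allowUnderlines : Bool) (allowParens : Bool) (allowNewLines : Bool) : String :=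
  let l := line.toList
  -- pass 1: italics (parts is never empty: Python's split returns ≥ 1 piece, so parts[0] is parts.headD [])
  let parts := PySem.Chars.splitOn l ['~']
  let st := parts.tail.foldl (joinStep "<i>".toList "</i>".toList) (parts.headD [], true)
  let out := if !st.2 then st.1 ++ "</i>".toList else st.1
  -- pass 2: underlines
  let out := if allowUnderlines then
      let parts := PySem.Chars.splitOn out ['_']
      let st := parts.tail.foldl (joinStep "<b><u>".toList "</b></u>".toList) (parts.headD [], true)
      if !st.2 then st.1 ++ "</b></u>".toList else st.1
    else out
  -- pass 3: parens
  let out := if allowParens then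
      let out := PySem.Chars.replace out ['('] "<strong>(".toList
      let out := PySem.Chars.replace out [')'] ")</strong>".toList
      if PySem.Chars.rfind l [')'] < PySem.Chars.rfind l ['('] then out ++ "</strong>".toList else out
    else out
  let out := if allowNewLines then PySem.Chars.replace out "&lt;br&gt;".toList "<br>".toList else out
  String.mk out

-- ===== PRECONDITION & SPEC =====
def Spec_get_formatted_question_html (line : String) (allowUnderlines : Bool) (allowParens : Bool) (allowNewLines : Bool) (out : String) : Prop := out = get_formatted_question_html_alt line allowUnderlines allowParens allowNewLines
instance (line : String) (allowUnderlines : Bool) (allowParens : Bool) (allowNewLines : Bool) (out : String) : Decidable (Spec_get_formatted_question_html line allowUnderlines allowParens allowNewLines out) := by unfold Spec_get_formatted_question_html; infer_instance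

-- ===== CLAIM (what is proved, stated in full; the proofs are below) =====
def Claim_equal_get_formatted_question_html : Prop := ∀ (line : String) (allowUnderlines : Bool) (allowParens : Bool) (allowNewLines : Bool), Dom_get_formatted_question_html line allowUnderlines allowParens allowNewLines → Spec_get_formatted_question_html line allowUnderlines allowParens allowNewLines (get_formatted_question_html line allowUnderlines allowParens allowNewLines)

-- ===== LEMMAS AND PROOFS =====

-- clean recursion computing Python's  s.split(sep)  for a single-character sep
def splitOnChar (a : Char) : List Char → List (List Char)
  | [] => [[]]
  | c :: cs =>
    if c = a then [] :: splitOnChar a cs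
    else match splitOnChar a cs with
      | [] => [[c]]      -- unreachable: splitOnChar is never []
      | p :: ps => (c :: p) :: ps

-- one marker pass with an "inside the marker" flag f; closes the tag at end-of-string if still open
def mpass (a : Char) (ot ct : List Char) : List Char → Bool → List Char
  | [], f => if f then ct else []
  | c :: cs, f =>
    if c = a then (if f then ct else ot) ++ mpass a ot ct cs (!f)
    else c :: mpass a ot ct cs f

-- the interleaving produced by B's rejoin loop, starting with tag-state b (b = openNext)
def tagcat (ot ct : List Char) : List (List Char) → Bool → List Char
  | [], _ => []
  | p :: ps, b => (if b then ot else ct) ++ p ++ tagcat ot ct ps (!b)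

def endb : List (List Char) → Bool → Bool
  | [], b => b
  | _ :: ps, b => endb ps (!b)

-- per-character substitution of B's paren pass
def pfsub (c : Char) : List Char := if c = '(' then "<strong>(".toList else if c = ')' then ")</strong>".toList else [c]

-- A's per-character output with italics/underline flags i u (parens rendered only when ap = true)
def acore (au ap : Bool) : List Char → Bool → Bool → List Char
  | [], _, _ => []
  | c :: cs, i, u =>
    if c = '~' then (if i then "</i>".toList else "<i>".toList) ++ acore au ap cs (!i) u
    else if c = '(' ∧ ap then "<strong>(".toList ++ acore au ap cs i u
    else if c = ')' ∧ ap then ")</strong>".toList ++ acore au ap cs i u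
    else if c = '_' ∧ au then (if u then "</b></u>".toList else "<b><u>".toList) ++ acore au ap cs i (!u)
    else c :: acore au ap cs i u

def iflagF : List Char → Bool → Bool
  | [], i => i
  | c :: cs, i => iflagF cs (if c = '~' then !i else i)

def uflagF (au : Bool) : List Char → Bool → Bool
  | [], u => u
  | c :: cs, u => uflagF au cs (if c = '_' ∧ au then !u else u)

def pflagF (ap : Bool) : List Char → Bool → Bool
  | [], p => p
  | c :: cs, p => pflagF ap cs (if c = '(' ∧ ap then true else if c = ')' ∧ ap then false else p)

def lastP : List Char → Option Char
  | [] => none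
  | c :: cs => match lastP cs with
    | some x => some x
    | none => if c = '(' ∨ c = ')' then some c else none

theorem afold_eq (au ap : Bool) (l : List Char) : ∀ (out : List Char) (i p u : Bool),
    l.foldl (aStep au ap) (out, i, p, u)
    = (out ++ acore au ap l i u, iflagF l i, pflagF ap l p, uflagF au l u) := by
  induction l with
  | nil => intro out i p u; simp [acore, iflagF, pflagF, uflagF]
  | cons c cs ih =>
    intro out i p u
    by_cases h1 : c = '~'
    · have h2 : ¬ (c = '(' ∧ ap = true) := by simp [h1]
      have h4 : ¬ (c = '_' ∧ au = true) := by simp [h1]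
      cases i
      · have hstep : aStep au ap (out, false, p, u) c = (out ++ "<i>".toList, true, p, u) := by
          simp [aStep, h1]
        rw [List.foldl_cons, hstep, ih]
        simp [acore, iflagF, pflagF, uflagF, h1, h2, h4]
      · have hstep : aStep au ap (out, true, p, u) c = (out ++ "</i>".toList, false, p, u) := by
          simp [aStep, h1]
        rw [List.foldl_cons, hstep, ih]
        simp [acore, iflagF, pflagF, uflagF, h1, h2, h4]
    · by_cases h2 : c = '(' ∧ ap = true
      · have hstep : aStep au ap (out, i, p, u) c = (out ++ "<strong>(".toList, i, true, u) := by
          simp [aStep, h1, h2]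
        rw [List.foldl_cons, hstep, ih]
        have h3 : ¬ (c = ')' ∧ ap = true) := by simp [h2.1]
        have h4 : ¬ (c = '_' ∧ au = true) := by simp [h2.1]
        simp [acore, iflagF, pflagF, uflagF, h1, h2, h3, h4]
      · by_cases h3 : c = ')' ∧ ap = true
        · have hstep : aStep au ap (out, i, p, u) c = (out ++ ")</strong>".toList, i, false, u) := by
            simp [aStep, h1, h2, h3]
          rw [List.foldl_cons, hstep, ih]
          have h4 : ¬ (c = '_' ∧ au = true) := by simp [h3.1]
          simp [acore, iflagF, pflagF, uflagF, h1, h2, h3, h4]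
        · by_cases h4 : c = '_' ∧ au = true
          · cases u
            · have hstep : aStep au ap (out, i, p, false) c = (out ++ "<b><u>".toList, i, p, true) := by
                simp [aStep, h1, h2, h3, h4]
              rw [List.foldl_cons, hstep, ih]
              simp [acore, iflagF, pflagF, uflagF, h1, h2, h3, h4]
            · have hstep : aStep au ap (out, i, p, true) c = (out ++ "</b></u>".toList, i, p, false) := by
                simp [aStep, h1, h2, h3, h4]
              rw [List.foldl_cons, hstep, ih]
              simp [acore, iflagF, pflagF, uflagF, h1, h2, h3, h4]
          · have hstep : aStep au ap (out, i, p, u) c = (out ++ [c], i, p, u) := by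
              simp [aStep, h1, h2, h3, h4]
            rw [List.foldl_cons, hstep, ih]
            simp [acore, iflagF, pflagF, uflagF, h1, h2, h3, h4]

theorem splitOnChar_ne_nil (a : Char) (l : List Char) : splitOnChar a l ≠ [] := by
  cases l with
  | nil => simp [splitOnChar]
  | cons c cs =>
    by_cases h : c = a
    · simp [splitOnChar, h]
    · simp only [splitOnChar, if_neg h]
      cases splitOnChar a cs <;> simp

theorem foldl_tagcat (ot ct : List Char) (ps : List (List Char)) : ∀ (o : List Char) (b : Bool),
    ps.foldl (joinStep ot ct) (o, b) = (o ++ tagcat ot ct ps b, endb ps b) := by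
  induction ps with
  | nil => intro o b; simp [tagcat, endb]
  | cons p rest ih =>
    intro o b
    rw [List.foldl_cons, joinStep, ih]
    simp [tagcat, endb]

theorem splitjoin_eq_mpass (a : Char) (ot ct : List Char) (l : List Char) : ∀ (f : Bool),
    (let parts := splitOnChar a l
     let st := (parts.headD [] ++ tagcat ot ct parts.tail (!f), endb parts.tail (!f))
     if !st.2 then st.1 ++ ct else st.1)
    = mpass a ot ct l f := by
  induction l with
  | nil =>
    intro f
    cases f <;> simp [splitOnChar, tagcat, endb, mpass]
  | cons c cs ih =>
    intro f
    by_cases h : c = a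
    · simp only [splitOnChar, if_pos h]
      obtain ⟨q, qs, hq⟩ : ∃ q qs, splitOnChar a cs = q :: qs := by
        cases hh : splitOnChar a cs with
        | nil => exact absurd hh (splitOnChar_ne_nil a cs)
        | cons q qs => exact ⟨q, qs, rfl⟩
      have ihf := ih (!f)
      rw [hq] at ihf ⊢
      simp only [List.headD, List.tail, tagcat, endb, Bool.not_not] at ihf ⊢
      simp only [mpass, if_pos h]
      rw [← ihf]
      cases f <;> (split_ifs <;> simp_all)
    · simp only [splitOnChar, if_neg h]
      obtain ⟨q, qs, hq⟩ : ∃ q qs, splitOnChar a cs = q :: qs := by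
        cases hh : splitOnChar a cs with
        | nil => exact absurd hh (splitOnChar_ne_nil a cs)
        | cons q qs => exact ⟨q, qs, rfl⟩
      have ihf := ih f
      rw [hq] at ihf ⊢
      simp only [List.headD, List.tail, mpass, if_neg h] at ihf ⊢
      rw [← ihf]
      cases endb qs (!f) <;> simp

theorem mpass_sepfree (a : Char) (ot ct : List Char) (pre : List Char) (h : a ∉ pre) :
    ∀ (rest : List Char) (f : Bool), mpass a ot ct (pre ++ rest) f = pre ++ mpass a ot ct rest f := by
  induction pre with
  | nil => intro rest f; simp
  | cons c cs ih =>
    intro rest f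
    have hc : ¬ (c = a) := by rintro rfl; exact h (List.mem_cons_self)
    have hcs : a ∉ cs := fun hm => h (List.mem_cons_of_mem _ hm)
    simp only [List.cons_append, mpass, if_neg hc, ih hcs]

theorem fuse_iu (l : List Char) : ∀ (i u : Bool),
    mpass '_' "<b><u>".toList "</b></u>".toList (mpass '~' "<i>".toList "</i>".toList l i) u
    = acore true false l i u
      ++ (if iflagF l i then "</i>".toList else [])
      ++ (if uflagF true l u then "</b></u>".toList else []) := by
  induction l with
  | nil =>
    intro i u
    cases i <;> cases u <;> simp [mpass, acore, iflagF, uflagF]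
  | cons c cs ih =>
    intro i u
    by_cases h1 : c = '~'
    · have hfree : '_' ∉ (if i then "</i>".toList else "<i>".toList) := by cases i <;> decide
      simp only [mpass, if_pos h1, mpass_sepfree _ _ _ _ hfree, ih]
      simp [acore, iflagF, uflagF, h1]
    · by_cases h2 : c = '_'
      · have hstep : mpass '~' "<i>".toList "</i>".toList (c :: cs) i
            = c :: mpass '~' "<i>".toList "</i>".toList cs i := by
          simp [mpass, h1]
        rw [hstep]
        simp only [mpass, if_pos h2, ih]
        simp [acore, iflagF, uflagF, h1, h2]
      · have hstep : mpass '~' "<i>".toList "</i>".toList (c :: cs) i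
            = c :: mpass '~' "<i>".toList "</i>".toList cs i := by
          simp [mpass, h1]
        rw [hstep]
        simp only [mpass, if_neg h2, ih]
        simp [acore, iflagF, uflagF, h1, h2]

theorem mpass_eq_acore (l : List Char) : ∀ (i : Bool),
    mpass '~' "<i>".toList "</i>".toList l i
    = acore false false l i false ++ (if iflagF l i then "</i>".toList else []) := by
  induction l with
  | nil => intro i; cases i <;> simp [mpass, acore, iflagF]
  | cons c cs ih =>
    intro i
    by_cases h1 : c = '~'
    · simp only [mpass, if_pos h1]
      rw [ih]
      cases i <;> simp [acore, iflagF, h1]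
    · simp only [mpass, if_neg h1]
      rw [ih]
      simp [acore, iflagF, h1]

theorem flatMap_pfsub_acore (au : Bool) (l : List Char) : ∀ (i u : Bool),
    (acore au false l i u).flatMap pfsub = acore au true l i u := by
  induction l with
  | nil => intro i u; simp [acore]
  | cons c cs ih =>
    intro i u
    by_cases h1 : c = '~'
    · cases i <;> simp [acore, h1, List.flatMap_append, ih, pfsub]
    · by_cases h2 : c = '('
      · simp [acore, h1, h2, List.flatMap_append, ih, pfsub]
      · by_cases h3 : c = ')'
        · simp [acore, h1, h2, h3, List.flatMap_append, ih, pfsub]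
        · by_cases h4 : c = '_' ∧ au = true
          · obtain ⟨hc, hau⟩ := h4
            subst hau
            cases u <;> simp [acore, h1, h2, h3, hc, List.flatMap_append, ih, pfsub]
          · have hp : pfsub c = [c] := by simp [pfsub, h2, h3]
            simp [acore, h1, h2, h3, h4, ih, hp]

theorem lastP_mem (l : List Char) : ∀ x, lastP l = some x → x = '(' ∨ x = ')' := by
  induction l with
  | nil => intro x h; simp [lastP] at h
  | cons c cs ih =>
    intro x h
    simp only [lastP] at h
    cases hcs : lastP cs with
    | some y => rw [hcs] at h; exact ih x (by rw [hcs]; exact h ▸ rfl)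
    | none =>
      rw [hcs] at h
      by_cases hp : c = '(' ∨ c = ')'
      · rw [if_pos hp] at h; cases h; exact hp
      · rw [if_neg hp] at h; cases h

theorem pflag_eq_lastP (l : List Char) : ∀ (p : Bool),
    pflagF true l p = (match lastP l with
      | some '(' => true
      | some ')' => false
      | _ => p) := by
  induction l with
  | nil => intro p; simp [pflagF, lastP]
  | cons c cs ih =>
    intro p
    simp only [pflagF, lastP, ih]
    cases hcs : lastP cs with
    | some y =>
      rcases lastP_mem cs y hcs with rfl | rfl <;> rfl
    | none =>
      by_cases hp : c = '(' ∨ c = ')'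
      · rcases hp with rfl | rfl <;> simp
      · push_neg at hp
        rw [if_neg (by simp [hp.1, hp.2] : ¬ (c = '(' ∨ c = ')'))]
        simp [hp.1, hp.2]

theorem pflag_false (l : List Char) : ∀ (p : Bool), pflagF false l p = p := by
  induction l with
  | nil => intro p; simp [pflagF]
  | cons c cs ih => intro p; simp [pflagF, ih]

theorem uflag_false (l : List Char) : ∀ (u : Bool), uflagF false l u = u := by
  induction l with
  | nil => intro u; simp [uflagF]
  | cons c cs ih => intro u; simp [uflagF, ih]

theorem splitOn_go_single (a : Char) : ∀ (l : List Char) (fuel : Nat) (cur : List Char) (acc : List (List Char)),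
    l.length < fuel →
    PySem.Chars.splitOn.go [a] fuel l cur acc
    = acc.reverse ++ (match splitOnChar a l with
        | [] => []
        | p :: ps => (cur.reverse ++ p) :: ps) := by
  intro l
  induction l with
  | nil =>
    intro fuel cur acc h
    cases fuel with
    | zero => omega
    | succ m => simp [PySem.Chars.splitOn.go, splitOnChar]
  | cons c cs ih =>
    intro fuel cur acc h
    cases fuel with
    | zero => omega
    | succ m =>
      by_cases hc : c = a
      · have hpre : [a].isPrefixOf (c :: cs) = true := by simp [List.isPrefixOf, hc]
        rw [PySem.Chars.splitOn.go]
        simp only [hpre, if_true]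
        have hlen : cs.length < m := by simp at h; omega
        rw [show List.drop [a].length (c :: cs) = cs by simp]
        rw [ih m [] (cur.reverse :: acc) hlen]
        obtain ⟨p, ps, hps⟩ : ∃ p ps, splitOnChar a cs = p :: ps := by
          cases hh : splitOnChar a cs with
          | nil => exact absurd hh (splitOnChar_ne_nil a cs)
          | cons p ps => exact ⟨p, ps, rfl⟩
        simp [splitOnChar, hc, hps]
      · have hpre : [a].isPrefixOf (c :: cs) = false := by
          simp [List.isPrefixOf]
          exact fun hh => absurd hh.symm hc
        rw [PySem.Chars.splitOn.go]
        simp only [hpre, Bool.false_eq_true, if_false]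
        have hlen : cs.length < m := by simp at h; omega
        rw [ih m (c :: cur) acc hlen]
        obtain ⟨p, ps, hps⟩ : ∃ p ps, splitOnChar a cs = p :: ps := by
          cases hh : splitOnChar a cs with
          | nil => exact absurd hh (splitOnChar_ne_nil a cs)
          | cons p ps => exact ⟨p, ps, rfl⟩
        simp [splitOnChar, hc, hps]

theorem splitOn_single (a : Char) (l : List Char) : PySem.Chars.splitOn l [a] = splitOnChar a l := by
  rw [PySem.Chars.splitOn, splitOn_go_single a l (l.length + 1) [] [] (by omega)]
  obtain ⟨p, ps, hps⟩ : ∃ p ps, splitOnChar a l = p :: ps := by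
    cases hh : splitOnChar a l with
    | nil => exact absurd hh (splitOnChar_ne_nil a l)
    | cons p ps => exact ⟨p, ps, rfl⟩
  simp [hps]

theorem replace_go_single (a : Char) (new : List Char) : ∀ (l : List Char) (fuel : Nat) (acc : List Char),
    l.length ≤ fuel →
    PySem.Chars.replace.go [a] new fuel l acc
    = acc.reverse ++ l.flatMap (fun c => if c = a then new else [c]) := by
  intro l
  induction l with
  | nil =>
    intro fuel acc h
    cases fuel with
    | zero => simp [PySem.Chars.replace.go]
    | succ m => simp [PySem.Chars.replace.go]
  | cons c cs ih =>
    intro fuel acc h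
    cases fuel with
    | zero => simp at h
    | succ m =>
      by_cases hc : c = a
      · have hpre : [a].isPrefixOf (c :: cs) = true := by simp [List.isPrefixOf, hc]
        rw [PySem.Chars.replace.go]
        simp only [hpre, if_true]
        have hlen : cs.length ≤ m := by simp at h; omega
        rw [show List.drop [a].length (c :: cs) = cs by simp]
        rw [ih m (new.reverse ++ acc) hlen]
        simp [hc]
      · have hpre : [a].isPrefixOf (c :: cs) = false := by
          simp [List.isPrefixOf]
          exact fun hh => absurd hh.symm hc
        rw [PySem.Chars.replace.go]
        simp only [hpre, Bool.false_eq_true, if_false]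
        have hlen : cs.length ≤ m := by simp at h; omega
        rw [ih m (c :: acc) hlen]
        simp [hc]

theorem replace_single (a : Char) (new : List Char) (l : List Char) :
    PySem.Chars.replace l [a] new = l.flatMap (fun c => if c = a then new else [c]) := by
  rw [PySem.Chars.replace]
  simp only [List.isEmpty_cons, Bool.false_eq_true, if_false]
  exact replace_go_single a new l l.length [] (le_refl _)

theorem rfind_go_cons (a c : Char) (cs : List Char) : ∀ (k : Nat),
    PySem.Chars.rfind.go (c :: cs) [a] (k + 1)
    = (if 0 ≤ PySem.Chars.rfind.go cs [a] k then PySem.Chars.rfind.go cs [a] k + 1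
       else if c = a then 0 else -1) := by
  intro k
  induction k with
  | zero =>
    rw [PySem.Chars.rfind.go, PySem.Chars.rfind.go, PySem.Chars.rfind.go]
    have hd : List.drop (0 + 1) (c :: cs) = cs := by simp
    rw [hd]
    by_cases hpre : [a].isPrefixOf cs = true
    · simp [hpre]
    · have hpre' : [a].isPrefixOf cs = false := by
        cases hh : [a].isPrefixOf cs
        · rfl
        · exact absurd hh hpre
      simp only [hpre', Bool.false_eq_true, if_false]
      by_cases hc : c = a
      · have hp2 : [a].isPrefixOf (c :: cs) = true := by simp [List.isPrefixOf, hc]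
        simp [hp2, hc]
      · have hp2 : [a].isPrefixOf (c :: cs) = false := by
          simp only [List.isPrefixOf, List.isPrefixOf_nil_left, Bool.and_true]
          exact beq_eq_false_iff_ne.mpr (Ne.symm hc)
        simp [hp2, hc]
  | succ k ihk =>
    rw [PySem.Chars.rfind.go]
    conv_rhs => rw [PySem.Chars.rfind.go]
    have hdrop : List.drop (k + 1 + 1) (c :: cs) = List.drop (k + 1) cs := by simp
    rw [hdrop]
    by_cases hpre : [a].isPrefixOf (List.drop (k + 1) cs) = true
    · simp [hpre]
      omega
    · simp only [hpre, Bool.false_eq_true, if_false]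
      exact ihk

theorem rfind_nil (a : Char) : PySem.Chars.rfind [] [a] = -1 := by
  rw [PySem.Chars.rfind]
  simp [PySem.Chars.rfind.go.eq_def, List.isPrefixOf]

theorem rfind_cons (a c : Char) (cs : List Char) :
    PySem.Chars.rfind (c :: cs) [a]
    = (if 0 ≤ PySem.Chars.rfind cs [a] then PySem.Chars.rfind cs [a] + 1
       else if c = a then 0 else -1) := by
  rw [PySem.Chars.rfind, PySem.Chars.rfind]
  exact rfind_go_cons a c cs cs.length

theorem rfind_lb (a : Char) (l : List Char) : -1 ≤ PySem.Chars.rfind l [a] := by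
  induction l with
  | nil => rw [rfind_nil]
  | cons c cs ih =>
    rw [rfind_cons]
    split_ifs <;> omega

theorem rfind_lastP (l : List Char) :
    (lastP l = none → PySem.Chars.rfind l ['('] = -1 ∧ PySem.Chars.rfind l [')'] = -1)
    ∧ (lastP l = some '(' → PySem.Chars.rfind l [')'] < PySem.Chars.rfind l ['('])
    ∧ (lastP l = some ')' → PySem.Chars.rfind l ['('] < PySem.Chars.rfind l [')']) := by
  induction l with
  | nil => simp [lastP, rfind_nil]
  | cons c cs ih =>
    obtain ⟨ih0, ih1, ih2⟩ := ih
    have lb1 := rfind_lb '(' cs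
    have lb2 := rfind_lb ')' cs
    rw [rfind_cons, rfind_cons]
    cases hcs : lastP cs with
    | some y =>
      have hl : lastP (c :: cs) = some y := by simp [lastP, hcs]
      rcases lastP_mem cs y hcs with rfl | rfl
      · have h1 := ih1 hcs
        have hge : 0 ≤ PySem.Chars.rfind cs ['('] := by omega
        refine ⟨by simp [hl], fun _ => ?_, fun hh => by rw [hl] at hh; simp at hh⟩
        rw [if_pos hge]
        by_cases h2 : 0 ≤ PySem.Chars.rfind cs [')']
        · rw [if_pos h2]; omega
        · rw [if_neg h2]; split_ifs <;> omega
      · have h1 := ih2 hcs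
        have hge : 0 ≤ PySem.Chars.rfind cs [')'] := by omega
        refine ⟨by simp [hl], fun hh => by rw [hl] at hh; simp at hh, fun _ => ?_⟩
        rw [if_pos hge]
        by_cases h2 : 0 ≤ PySem.Chars.rfind cs ['(']
        · rw [if_pos h2]; omega
        · rw [if_neg h2]; split_ifs <;> omega
    | none =>
      obtain ⟨e1, e2⟩ := ih0 hcs
      rw [e1, e2]
      have hn1 : ¬ (0:Int) ≤ -1 := by omega
      rw [if_neg hn1, if_neg hn1]
      by_cases hc1 : c = '('
      · have hl : lastP (c :: cs) = some '(' := by simp [lastP, hcs, hc1]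
        have hc2 : ¬ c = ')' := by simp [hc1]
        refine ⟨by simp [hl], fun _ => ?_, fun hh => by rw [hl] at hh; simp at hh⟩
        simp [hc1, hc2]
      · by_cases hc2 : c = ')'
        · have hl : lastP (c :: cs) = some ')' := by simp [lastP, hcs, hc2]
          refine ⟨by simp [hl], fun hh => by rw [hl] at hh; simp at hh, fun _ => ?_⟩
          simp [hc1, hc2]
        · have hl : lastP (c :: cs) = none := by simp [lastP, hcs, hc1, hc2]
          refine ⟨fun _ => ?_, fun hh => by rw [hl] at hh; simp at hh, fun hh => by rw [hl] at hh; simp at hh⟩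
          simp [hc1, hc2]

theorem rfind_vs_lastP (l : List Char) :
    decide (PySem.Chars.rfind l [')'] < PySem.Chars.rfind l ['(']) = (lastP l == some '(') := by
  obtain ⟨h0, h1, h2⟩ := rfind_lastP l
  cases hl : lastP l with
  | none =>
    obtain ⟨e1, e2⟩ := h0 hl
    simp [e1, e2]
  | some y =>
    rcases lastP_mem l y hl with rfl | rfl
    · simp [h1 hl]
    · have hlt := h2 hl
      have hne : ¬ PySem.Chars.rfind l [')'] < PySem.Chars.rfind l ['('] := by omega
      simp [hne]


theorem pass_unfold (a : Char) (ot ct : List Char) (x : List Char) :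
    (if (!endb (splitOnChar a x).tail true) = true
     then (splitOnChar a x).headD [] ++ tagcat ot ct (splitOnChar a x).tail true ++ ct
     else (splitOnChar a x).headD [] ++ tagcat ot ct (splitOnChar a x).tail true)
    = mpass a ot ct x false := by
  have h := splitjoin_eq_mpass a ot ct x false
  simpa [List.append_assoc] using h

theorem pchain (x : List Char) :
    (x.flatMap (fun c => if c = '(' then ['<','s','t','r','o','n','g','>','('] else [c])).flatMap
      (fun c => if c = ')' then [')','<','/','s','t','r','o','n','g','>'] else [c])
    = x.flatMap pfsub := by
  induction x with
  | nil => simp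
  | cons c cs ih =>
    by_cases h2 : c = '('
    · simp [h2, List.flatMap_append, ih, pfsub]
    · by_cases h3 : c = ')'
      · simp [h2, h3, List.flatMap_append, ih, pfsub]
      · simp [h2, h3, List.flatMap_append, ih, pfsub]

theorem pflag_rfind (l : List Char) :
    pflagF true l false = decide (PySem.Chars.rfind l [')'] < PySem.Chars.rfind l ['(']) := by
  rw [rfind_vs_lastP, pflag_eq_lastP]
  cases hl : lastP l with
  | none => simp
  | some y => rcases lastP_mem l y hl with rfl | rfl <;> simp

-- ===== VERDICT (by name: the statement is the Claim_ definition above) =====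
theorem get_formatted_question_html_spec : Claim_equal_get_formatted_question_html := by
  intro line au ap an _
  unfold Spec_get_formatted_question_html
  unfold get_formatted_question_html get_formatted_question_html_alt
  rw [afold_eq au ap line.toList [] false false false]
  simp only [splitOn_single, foldl_tagcat]
  simp only [pass_unfold]
  cases au
  · rw [mpass_eq_acore, uflag_false]
    cases ap
    · rw [pflag_false]
      by_cases hi : iflagF line.toList false = true <;>
        simp [hi, List.append_assoc]
    · rw [pflag_rfind]
      simp only [replace_single, pchain]
      by_cases hP : PySem.Chars.rfind line.toList [')'] < PySem.Chars.rfind line.toList ['('] <;>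
        by_cases hi : iflagF line.toList false = true <;>
          simp [hP, hi, List.flatMap_append, pchain, flatMap_pfsub_acore, pfsub, List.append_assoc]
  · rw [fuse_iu]
    cases ap
    · rw [pflag_false]
      by_cases hi : iflagF line.toList false = true <;>
        by_cases hu : uflagF true line.toList false = true <;>
          simp [hi, hu, List.append_assoc]
    · rw [pflag_rfind]
      simp only [replace_single, pchain]
      by_cases hP : PySem.Chars.rfind line.toList [')'] < PySem.Chars.rfind line.toList ['('] <;>
        by_cases hi : iflagF line.toList false = true <;>
          by_cases hu : uflagF true line.toList false = true <;>
            simp [hP, hi, hu, List.flatMap_append, pchain, flatMap_pfsub_acore, pfsub, List.append_assoc]
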